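-- pv_equiv track=rewrite | github.com/Currycurrycurry/FDSS_Algorithm | labuladong/mono_stack.py | _get_pre_table
-- ===== SOURCE A (Python) =====
-- def _get_pre_table(S):
--     N = len(S)
--     pre_table = [[0 for _ in range(N+1)] for _ in range(26)]
--     for i in range(26):
--         for j in range(1, N):
--             pre_table[i][j-1]
--             count = 0
--             for k in range(j+1, N):
--                 if ord(S[k]) > i + ord('A'):
--                     count += 1
--             pre_table[i][j] = count
--     return pre_table
-- ===== SOURCE B (Python) =====
-- def _get_pre_table(S):
--     N = len(S)
--     pre_table = [[0] * (N + 1) for _ in range(26)]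
--     cnt = [0] * 26
--     for j in range(N - 1, 0, -1):
--         code = ord(S[j])
--         for i in range(26):
--             pre_table[i][j] = cnt[i]
--             if code > i + ord('A'):
--                 cnt[i] += 1
--     return pre_table
-- ===== Notes on version B (the rewrite author's own statement) =====
-- stated objective: faster
-- what changed: Replaces the O(26*N^2) per-cell rescan of the suffix with a single right-to-left pass that maintains 26 running greater-than counters, filling each column from the current counters.
import Mathlib
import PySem

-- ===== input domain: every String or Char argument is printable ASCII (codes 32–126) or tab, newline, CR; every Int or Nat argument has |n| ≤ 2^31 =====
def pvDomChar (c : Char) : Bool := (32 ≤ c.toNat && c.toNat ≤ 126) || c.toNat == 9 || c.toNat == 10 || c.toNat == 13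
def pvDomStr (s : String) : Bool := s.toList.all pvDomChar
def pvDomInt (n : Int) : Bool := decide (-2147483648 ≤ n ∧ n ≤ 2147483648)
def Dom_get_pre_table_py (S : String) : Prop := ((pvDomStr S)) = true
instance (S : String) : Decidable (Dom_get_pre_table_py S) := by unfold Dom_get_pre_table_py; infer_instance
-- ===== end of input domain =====

-- B replaces A's per-cell rescans of the suffix by one right-to-left pass with 26 running counters (asymptotically faster).


-- ===== PORT A =====
-- the innermost Python loop `for k in range(j+1, N): if ord(S[k]) > i + ord('A'): count += 1`
def aCount (cs : List Char) (i : Nat) (j : Nat) : Int :=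
  (List.range' (j+1) (cs.length - (j+1))).foldl
    (fun c k => if i + 65 < (cs.getD k ' ').toNat then c + 1 else c) 0

def get_pre_table_py (S : String) : List (List Int) :=
  let cs := S.toList
  let N := cs.length
  let pre0 : List (List Int) := (List.range 26).map (fun _ => (List.range (N+1)).map (fun _ => (0:Int)))
  (List.range 26).foldl (fun pt i =>
    (List.range' 1 (N-1)).foldl (fun pt j =>
      pt.set i ((pt.getD i []).set j (aCount cs i j))) pt) pre0

-- ===== PORT B =====
-- one column of B: `for i in range(26): pre_table[i][j] = cnt[i]; if code > i + ord('A'): cnt[i] += 1`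
def bStep (cs : List Char) (j : Nat) (st : List (List Int) × List Int) : List (List Int) × List Int :=
  let code := (cs.getD j ' ').toNat
  (List.range 26).foldl (fun st i =>
    (st.1.set i ((st.1.getD i []).set j (st.2.getD i 0)),
     if i + 65 < code then st.2.set i (st.2.getD i 0 + 1) else st.2)) st

def get_pre_table_py_alt (S : String) : List (List Int) :=
  let cs := S.toList
  let N := cs.length
  let table0 : List (List Int) := (List.range 26).map (fun _ => (List.range (N+1)).map (fun _ => (0:Int)))
  let cnt0 : List Int := (List.range 26).map (fun _ => (0:Int))
  ((List.range' 1 (N-1)).reverse.foldl (fun st j => bStep cs j st) (table0, cnt0)).1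

-- ===== PRECONDITION & SPEC =====
def Spec_get_pre_table_py (S : String) (out : List (List Int)) : Prop := out = get_pre_table_py_alt S
instance (S : String) (out : List (List Int)) : Decidable (Spec_get_pre_table_py S out) := by unfold Spec_get_pre_table_py; infer_instance

-- ===== CLAIM (what is proved, stated in full; the proofs are below) =====
def Claim_equal_get_pre_table_py : Prop := ∀ (S : String), Dom_get_pre_table_py S → Spec_get_pre_table_py S (get_pre_table_py S)

-- ===== LEMMAS AND PROOFS =====

-- the common value: entry (i, j) of either table is, for j ≥ 1, the number of characters strictly
-- after position j that exceed chr(i + 65); column 0 is left at 0 by both programs.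
def specRow (cs : List Char) (i : Nat) : List Int :=
  (List.range (cs.length+1)).map (fun j =>
    if j = 0 then 0 else ((cs.drop (j+1)).countP (fun ch => decide (i + 65 < ch.toNat)) : Int))

def specTable (cs : List Char) : List (List Int) := (List.range 26).map (specRow cs)

-- ---- A side ----

theorem count_aux (cs : List Char) (i : Nat) : ∀ (n s : Nat), s + n = cs.length → ∀ (c : Int),
    (List.range' s n).foldl (fun c k => if i + 65 < (cs.getD k ' ').toNat then c + 1 else c) c
    = c + ((cs.drop s).countP (fun ch => decide (i + 65 < ch.toNat)) : Int) := by
  intro n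
  induction n with
  | zero =>
    intro s hs c
    have hd : cs.drop s = [] := List.drop_eq_nil_of_le (by omega)
    simp [hd]
  | succ n ih =>
    intro s hs c
    have hslt : s < cs.length := by omega
    rw [List.range'_succ, List.foldl_cons, ih (s+1) (by omega),
        List.drop_eq_getElem_cons hslt, List.countP_cons, List.getD_eq_getElem cs ' ' hslt]
    by_cases h : i + 65 < cs[s].toNat <;> simp [h] <;> ring

theorem aCount_eq (cs : List Char) (i j : Nat) :
    aCount cs i j = ((cs.drop (j+1)).countP (fun ch => decide (i + 65 < ch.toNat)) : Int) := by
  unfold aCount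
  by_cases h : j + 1 ≤ cs.length
  · rw [count_aux cs i _ (j+1) (by omega)]; ring
  · have hd : cs.drop (j+1) = [] := List.drop_eq_nil_of_le (by omega)
    have h0 : cs.length - (j+1) = 0 := by omega
    rw [h0]; simp [hd]

theorem foldl_set_getElem? (f : Nat → Int) : ∀ (idxs : List Nat) (r : List Int) (m : Nat),
    (idxs.foldl (fun r j => r.set j (f j)) r)[m]? = if m ∈ idxs ∧ m < r.length then some (f m) else r[m]? := by
  intro idxs
  induction idxs with
  | nil => simp
  | cons j rest ih =>
    intro r m
    rw [List.foldl_cons, ih, List.length_set, List.getElem?_set]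
    by_cases h1 : m ∈ rest <;> by_cases h2 : m < r.length <;> by_cases h3 : j = m <;>
      simp [h1, h2, h3, List.mem_cons] <;> omega

theorem foldl_setrow (i : Nat) (f : Nat → Int) : ∀ (idxs : List Nat) (pt : List (List Int)), i < pt.length →
    idxs.foldl (fun pt j => pt.set i ((pt.getD i []).set j (f j))) pt
    = pt.set i (idxs.foldl (fun r j => r.set j (f j)) (pt.getD i [])) := by
  intro idxs
  induction idxs with
  | nil =>
    intro pt h
    rw [List.foldl_nil, List.foldl_nil, List.getD_eq_getElem _ _ h, List.set_getElem_self h]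
  | cons j rest ih =>
    intro pt h
    rw [List.foldl_cons, ih _ (by simpa using h), List.foldl_cons]
    have hg : ((pt.set i ((pt.getD i []).set j (f j))).getD i []) = (pt.getD i []).set j (f j) := by
      rw [List.getD_eq_getElem _ _ (by simpa using h), List.getElem_set_self]
    rw [hg, List.set_set]

theorem outerA (cs : List Char) (g : Nat → Nat → Int) : ∀ (k a : Nat) (pt : List (List Int)), a + k ≤ pt.length → ∀ m,
    ((List.range' a k).foldl (fun pt i =>
      (List.range' 1 (cs.length-1)).foldl (fun pt j => pt.set i ((pt.getD i []).set j (g i j))) pt) pt)[m]?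
    = if a ≤ m ∧ m < a + k
      then some ((List.range' 1 (cs.length-1)).foldl (fun r j => r.set j (g m j)) (pt.getD m []))
      else pt[m]? := by
  intro k
  induction k with
  | zero => intro a pt h m; rw [List.range'_zero, List.foldl_nil, if_neg (by omega)]
  | succ k ih =>
    intro a pt h m
    rw [List.range'_succ, List.foldl_cons, foldl_setrow a (g a) _ pt (by omega),
        ih (a+1) _ (by rw [List.length_set]; omega)]
    have hlen : a < pt.length := by omega
    by_cases h1 : a + 1 ≤ m ∧ m < a + 1 + k
    · have hg : ((pt.set a ((List.range' 1 (cs.length-1)).foldl (fun r j => r.set j (g a j)) (pt.getD a []))).getD m [])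
          = pt.getD m [] := by
        rw [List.getD_eq_getElem?_getD, List.getElem?_set, List.getD_eq_getElem?_getD]
        simp [show ¬ (a = m) by omega]
      rw [if_pos h1, hg, if_pos (by omega)]
    · rw [if_neg h1, List.getElem?_set]
      by_cases h2 : a = m
      · subst h2; simp [hlen]
      · rw [if_neg h2, if_neg (by omega)]

theorem getElem?_map_range {α : Type} (f : Nat → α) (n m : Nat) :
    ((List.range n).map f)[m]? = if m < n then some (f m) else none := by
  by_cases h : m < n
  · rw [List.getElem?_map, List.getElem?_range h, Option.map_some, if_pos h]
  · rw [if_neg h, List.getElem?_eq_none (by simp; omega)]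

theorem getElem?_map_range0 {α : Type} (f : Nat → α) (n m : Nat) :
    ((List.range' 0 n).map f)[m]? = if m < n then some (f m) else none := by
  rw [← List.range_eq_range']; exact getElem?_map_range f n m

theorem rowA_eq (cs : List Char) (i : Nat) :
    (List.range' 1 (cs.length-1)).foldl (fun r j => r.set j (aCount cs i j))
      ((List.range (cs.length+1)).map (fun _ => (0:Int)))
    = specRow cs i := by
  apply List.ext_getElem?
  intro jm
  rw [foldl_set_getElem? (aCount cs i)]
  have hspec : (specRow cs i)[jm]? = if jm < cs.length+1
      then some (if jm = 0 then (0:Int) else ((cs.drop (jm+1)).countP (fun ch => decide (i + 65 < ch.toNat)) : Int))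
      else none := by
    unfold specRow
    rw [getElem?_map_range]
  rw [hspec, List.length_map, List.length_range]
  by_cases hc : jm ∈ List.range' 1 (cs.length-1) ∧ jm < cs.length+1
  · obtain ⟨hm1, hm2⟩ := List.mem_range'_1.mp hc.1
    rw [if_pos hc, if_pos hc.2, aCount_eq, if_neg (by omega)]
  · rw [if_neg hc, getElem?_map_range]
    by_cases h2 : jm < cs.length + 1
    · rw [if_pos h2, if_pos h2]
      by_cases h0 : jm = 0
      · simp [h0]
      · have hnm : ¬ (jm ∈ List.range' 1 (cs.length-1)) := fun h => hc ⟨h, h2⟩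
        rw [List.mem_range'_1] at hnm
        have hd : cs.drop (jm+1) = [] := List.drop_eq_nil_of_le (by omega)
        simp [h0, hd]
    · rw [if_neg h2, if_neg h2]

theorem A_eq_spec (S : String) : get_pre_table_py S = specTable S.toList := by
  simp only [get_pre_table_py, specTable]
  apply List.ext_getElem?
  intro m
  rw [show (List.range 26 : List Nat) = List.range' 0 26 from List.range_eq_range',
      outerA S.toList (aCount S.toList) 26 0 _ (by simp) m]
  by_cases hm : m < 26
  · rw [if_pos (by omega)]
    have hg : (((List.range' 0 26).map (fun _ => (List.range (S.toList.length+1)).map (fun _ => (0:Int)))).getD m [])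
        = (List.range (S.toList.length+1)).map (fun _ => (0:Int)) := by
      rw [List.getD_eq_getElem?_getD, getElem?_map_range0, if_pos hm]; rfl
    rw [hg, rowA_eq, getElem?_map_range0, if_pos hm]
  · rw [if_neg (by omega), getElem?_map_range0, getElem?_map_range0, if_neg hm, if_neg hm]

-- ---- B side ----

theorem innerB (j : Nat) (code : Nat) : ∀ (k a : Nat) (t : List (List Int)) (cnt : List Int),
    a + k ≤ t.length → a + k ≤ cnt.length →
    (∀ m, (((List.range' a k).foldl (fun st i =>
        (st.1.set i ((st.1.getD i []).set j (st.2.getD i 0)),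
         if i + 65 < code then st.2.set i (st.2.getD i 0 + 1) else st.2)) (t, cnt)).1)[m]?
      = (if a ≤ m ∧ m < a + k then some ((t.getD m []).set j (cnt.getD m 0)) else t[m]?))
    ∧ (∀ m, (((List.range' a k).foldl (fun st i =>
        (st.1.set i ((st.1.getD i []).set j (st.2.getD i 0)),
         if i + 65 < code then st.2.set i (st.2.getD i 0 + 1) else st.2)) (t, cnt)).2)[m]?
      = (if a ≤ m ∧ m < a + k then some (cnt.getD m 0 + (if m + 65 < code then 1 else 0)) else cnt[m]?)) := by
  intro k
  induction k with
  | zero =>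
    intro a t cnt h1 h2
    constructor <;> intro m <;> rw [List.range'_zero, List.foldl_nil, if_neg (by omega)]
  | succ k ih =>
    intro a t cnt h1 h2
    rw [List.range'_succ, List.foldl_cons]
    set t' := t.set a ((t.getD a []).set j (cnt.getD a 0)) with ht'
    set cnt' := (if a + 65 < code then cnt.set a (cnt.getD a 0 + 1) else cnt) with hcnt'
    have hlt : t'.length = t.length := by rw [ht', List.length_set]
    have hlc : cnt'.length = cnt.length := by rw [hcnt']; split <;> simp
    obtain ⟨iht, ihc⟩ := ih (a+1) t' cnt' (by omega) (by omega)
    constructor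
    · intro m
      rw [iht m]
      by_cases hin : a+1 ≤ m ∧ m < a+1+k
      · rw [if_pos hin, if_pos (show a ≤ m ∧ m < a + (k+1) by omega)]
        have e1 : t'.getD m [] = t.getD m [] := by
          simp [ht', List.getD_eq_getElem?_getD, show ¬(a=m) by omega]
        have e2 : cnt'.getD m 0 = cnt.getD m 0 := by
          by_cases hcode : a + 65 < code <;>
            simp [hcnt', hcode, List.getD_eq_getElem?_getD, show ¬(a=m) by omega]
        rw [e1, e2]
      · rw [if_neg hin]
        by_cases hma : a = m
        · subst hma; rw [if_pos (show a ≤ a ∧ a < a + (k+1) by omega), ht', List.getElem?_set, if_pos rfl,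
            if_pos (show a < t.length by omega)]
        · rw [if_neg (by omega), ht', List.getElem?_set, if_neg hma]
    · intro m
      rw [ihc m]
      by_cases hin : a+1 ≤ m ∧ m < a+1+k
      · have e2 : cnt'.getD m 0 = cnt.getD m 0 := by
          by_cases hcode : a + 65 < code <;>
            simp [hcnt', hcode, List.getD_eq_getElem?_getD, show ¬(a=m) by omega]
        rw [if_pos hin, if_pos (show a ≤ m ∧ m < a + (k+1) by omega), e2]
      · rw [if_neg hin]
        have hmlen : a < cnt.length := by omega
        by_cases hma : a = m
        · subst hma
          rw [if_pos (show a ≤ a ∧ a < a + (k+1) by omega)]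
          by_cases hcode : a + 65 < code
          · rw [hcnt', if_pos hcode, List.getElem?_set, if_pos rfl, if_pos hmlen, if_pos hcode]
          · rw [hcnt', if_neg hcode, if_neg hcode, List.getElem?_eq_getElem hmlen,
              List.getD_eq_getElem _ _ hmlen]
            simp
        · rw [if_neg (by omega), hcnt']
          by_cases hcode : a + 65 < code
          · rw [if_pos hcode, List.getElem?_set, if_neg hma]
          · rw [if_neg hcode]

-- the running-counter invariant rows: positions s..N-1 already filled, the rest still 0
def rowS (cs : List Char) (s i : Nat) : List Int :=
  (List.range (cs.length+1)).map (fun jm =>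
    if s ≤ jm ∧ jm < cs.length
    then ((cs.drop (jm+1)).countP (fun ch => decide (i + 65 < ch.toNat)) : Int) else 0)

theorem rowS_len (cs : List Char) (s i : Nat) : (rowS cs s i).length = cs.length + 1 := by
  simp [rowS]

theorem rowS_step (cs : List Char) (s i : Nat) (hs : s < cs.length) :
    (rowS cs (s+1) i).set s ((cs.drop (s+1)).countP (fun ch => decide (i + 65 < ch.toNat)) : Int)
      = rowS cs s i := by
  apply List.ext_getElem?
  intro jm
  rw [List.getElem?_set, rowS_len]
  unfold rowS
  rw [getElem?_map_range, getElem?_map_range]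
  by_cases hj : s = jm
  · subst hj
    rw [if_pos rfl, if_pos (by omega), if_pos (by omega), if_pos ⟨le_refl s, hs⟩]
  · rw [if_neg hj]
    by_cases h2 : jm < cs.length + 1
    · rw [if_pos h2, if_pos h2]
      by_cases h3 : s + 1 ≤ jm ∧ jm < cs.length
      · rw [if_pos h3, if_pos (by omega)]
      · rw [if_neg h3, if_neg (by omega)]
    · rw [if_neg h2, if_neg h2]

theorem outerB (cs : List Char) : ∀ (k s : Nat), 1 ≤ s → s + k = cs.length →
    (List.range' s k).foldr (fun j st => bStep cs j st)
      ((List.range 26).map (fun _ => (List.range (cs.length+1)).map (fun _ => (0:Int))),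
       (List.range 26).map (fun _ => (0:Int)))
    = ((List.range 26).map (fun i => rowS cs s i),
       (List.range 26).map (fun i => ((cs.drop s).countP (fun ch => decide (i + 65 < ch.toNat)) : Int))) := by
  intro k
  induction k with
  | zero =>
    intro s h1 h2
    rw [List.range'_zero, List.foldr_nil, Prod.mk.injEq]
    have hd : cs.drop s = [] := List.drop_eq_nil_of_le (by omega)
    constructor
    · apply List.map_congr_left
      intro i _
      unfold rowS
      apply List.map_congr_left
      intro jm _
      rw [if_neg (by omega)]
    · apply List.map_congr_left
      intro i _
      rw [hd]
      simp
  | succ k ih =>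
    intro s h1 h2
    have hs : s < cs.length := by omega
    rw [List.range'_succ, List.foldr_cons, ih (s+1) (by omega) (by omega)]
    simp only [bStep]
    rw [show (List.range 26 : List Nat) = List.range' 0 26 from List.range_eq_range']
    obtain ⟨iht, ihc⟩ := innerB s ((cs.getD s ' ').toNat) 26 0
      ((List.range' 0 26).map (fun i => rowS cs (s+1) i))
      ((List.range' 0 26).map (fun i => ((cs.drop (s+1)).countP (fun ch => decide (i + 65 < ch.toNat)) : Int)))
      (by simp) (by simp)
    have h1c : (((List.range' 0 26).foldl (fun st i =>
        (st.1.set i ((st.1.getD i []).set s (st.2.getD i 0)),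
         if i + 65 < (cs.getD s ' ').toNat then st.2.set i (st.2.getD i 0 + 1) else st.2))
        ((List.range' 0 26).map (fun i => rowS cs (s+1) i),
         (List.range' 0 26).map (fun i => ((cs.drop (s+1)).countP (fun ch => decide (i + 65 < ch.toNat)) : Int)))).1)
        = (List.range' 0 26).map (fun i => rowS cs s i) := by
      apply List.ext_getElem?
      intro m
      rw [iht m]
      by_cases hm : m < 26
      · rw [if_pos (show 0 ≤ m ∧ m < 0 + 26 by omega), getElem?_map_range0, if_pos hm]
        have hT : ((List.range' 0 26).map (fun i => rowS cs (s+1) i)).getD m [] = rowS cs (s+1) m := by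
          rw [List.getD_eq_getElem?_getD, getElem?_map_range0, if_pos hm]; rfl
        have hC : ((List.range' 0 26).map (fun i => ((cs.drop (s+1)).countP (fun ch => decide (i + 65 < ch.toNat)) : Int))).getD m 0
            = ((cs.drop (s+1)).countP (fun ch => decide (m + 65 < ch.toNat)) : Int) := by
          rw [List.getD_eq_getElem?_getD, getElem?_map_range0, if_pos hm]; rfl
        rw [hT, hC, rowS_step cs s m hs]
      · rw [if_neg (show ¬(0 ≤ m ∧ m < 0 + 26) by omega), getElem?_map_range0, getElem?_map_range0,
          if_neg hm, if_neg hm]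
    have h2c : (((List.range' 0 26).foldl (fun st i =>
        (st.1.set i ((st.1.getD i []).set s (st.2.getD i 0)),
         if i + 65 < (cs.getD s ' ').toNat then st.2.set i (st.2.getD i 0 + 1) else st.2))
        ((List.range' 0 26).map (fun i => rowS cs (s+1) i),
         (List.range' 0 26).map (fun i => ((cs.drop (s+1)).countP (fun ch => decide (i + 65 < ch.toNat)) : Int)))).2)
        = (List.range' 0 26).map (fun i => ((cs.drop s).countP (fun ch => decide (i + 65 < ch.toNat)) : Int)) := by
      apply List.ext_getElem?
      intro m
      rw [ihc m]
      by_cases hm : m < 26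
      · rw [if_pos (show 0 ≤ m ∧ m < 0 + 26 by omega), getElem?_map_range0, if_pos hm]
        have hC : ((List.range' 0 26).map (fun i => ((cs.drop (s+1)).countP (fun ch => decide (i + 65 < ch.toNat)) : Int))).getD m 0
            = ((cs.drop (s+1)).countP (fun ch => decide (m + 65 < ch.toNat)) : Int) := by
          rw [List.getD_eq_getElem?_getD, getElem?_map_range0, if_pos hm]; rfl
        rw [hC, List.drop_eq_getElem_cons hs, List.countP_cons, List.getD_eq_getElem cs ' ' hs]
        by_cases hcode : m + 65 < cs[s].toNat <;> simp [hcode]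
      · rw [if_neg (show ¬(0 ≤ m ∧ m < 0 + 26) by omega), getElem?_map_range0, getElem?_map_range0,
          if_neg hm, if_neg hm]
    exact Prod.ext h1c h2c

theorem B_eq_spec (S : String) : get_pre_table_py_alt S = specTable S.toList := by
  simp only [get_pre_table_py_alt, specTable]
  rw [List.foldl_reverse]
  by_cases hN : S.toList.length = 0
  · rw [show S.toList.length - 1 = 0 from by omega, List.range'_zero, List.foldr_nil]
    apply List.map_congr_left
    intro i _
    unfold specRow
    apply List.map_congr_left
    intro jm hjm
    rw [List.mem_range] at hjm
    rw [if_pos (by omega)]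
  · rw [outerB S.toList (S.toList.length - 1) 1 (le_refl 1) (by omega)]
    apply List.map_congr_left
    intro i _
    unfold rowS specRow
    apply List.map_congr_left
    intro jm hjm
    rw [List.mem_range] at hjm
    by_cases h0 : jm = 0
    · rw [if_neg (by omega), if_pos h0]
    · rw [if_neg h0]
      by_cases h1 : 1 ≤ jm ∧ jm < S.toList.length
      · rw [if_pos h1]
      · have hd : S.toList.drop (jm+1) = [] := List.drop_eq_nil_of_le (by omega)
        rw [if_neg h1, hd]
        simp

-- ===== VERDICT (by name: the statement is the Claim_ definition above) =====
theorem get_pre_table_py_spec : Claim_equal_get_pre_table_py := by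
  intro S _
  unfold Spec_get_pre_table_py
  rw [A_eq_spec, B_eq_spec]
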